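-- pv_equiv track=rewrite | github.com/inveniosoftware/invenio | invenio/legacy/bibupload/revisionverifier.py | compare_tags_by_ind
-- ===== SOURCE A (Python) =====
-- import copy
--
-- def compare_tags_by_ind(rec1_tag_val, rec2_tag_val):
--     """
--     Groups the fields(of given tag) based on the indicator pairs
--
--     Returns a tuple of lists,each list denoting common/specific indicators
--     """
--     # temporary dictionary to hold fields from record2
--     tmp = copy.deepcopy(rec2_tag_val)
--
--     common_ind_pair = {}
--     ind_pair_in_rec1_tag = {}
--     ind_pair_in_rec2_tag = {}
--
--     for ind_pair in rec1_tag_val: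
--         # if indicator pair is common
--         if ind_pair in tmp:
--             # copying values from record1 tag as this could help
--             # at next stage in case of any subfield level modifications
--             # this could be directly used.
--             common_ind_pair[ind_pair] = rec1_tag_val[ind_pair]
--             del tmp[ind_pair]
--         else:
--             # indicator pair is present only in current tag field
--             ind_pair_in_rec1_tag[ind_pair] = rec1_tag_val[ind_pair]
--
--     for ind_pair in rec2_tag_val:
--         # indicator pair present only in record2 tag field
--         if ind_pair in tmp:
--             ind_pair_in_rec2_tag[ind_pair] = rec2_tag_val[ind_pair]
--
--     return (common_ind_pair, ind_pair_in_rec1_tag, ind_pair_in_rec2_tag)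
-- ===== SOURCE B (Python) =====
-- def compare_tags_by_ind(rec1_tag_val, rec2_tag_val):
--     """Set-algebra version: classify each key directly by membership in the
--     other record, no deep copy and no destructive deletion bookkeeping."""
--     common_ind_pair = {k: v for k, v in rec1_tag_val.items() if k in rec2_tag_val}
--     ind_pair_in_rec1_tag = {k: v for k, v in rec1_tag_val.items() if k not in rec2_tag_val}
--     ind_pair_in_rec2_tag = {k: v for k, v in rec2_tag_val.items() if k not in rec1_tag_val}
--     return (common_ind_pair, ind_pair_in_rec1_tag, ind_pair_in_rec2_tag)
-- ===== Notes on version B (the rewrite author's own statement) =====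
-- stated objective: simpler
-- what changed: Replaces the deepcopy + destructive two-pass tmp-deletion bookkeeping with three direct dict comprehensions classifying each key by membership in the other record (set algebra on the key sets).
import Mathlib
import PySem

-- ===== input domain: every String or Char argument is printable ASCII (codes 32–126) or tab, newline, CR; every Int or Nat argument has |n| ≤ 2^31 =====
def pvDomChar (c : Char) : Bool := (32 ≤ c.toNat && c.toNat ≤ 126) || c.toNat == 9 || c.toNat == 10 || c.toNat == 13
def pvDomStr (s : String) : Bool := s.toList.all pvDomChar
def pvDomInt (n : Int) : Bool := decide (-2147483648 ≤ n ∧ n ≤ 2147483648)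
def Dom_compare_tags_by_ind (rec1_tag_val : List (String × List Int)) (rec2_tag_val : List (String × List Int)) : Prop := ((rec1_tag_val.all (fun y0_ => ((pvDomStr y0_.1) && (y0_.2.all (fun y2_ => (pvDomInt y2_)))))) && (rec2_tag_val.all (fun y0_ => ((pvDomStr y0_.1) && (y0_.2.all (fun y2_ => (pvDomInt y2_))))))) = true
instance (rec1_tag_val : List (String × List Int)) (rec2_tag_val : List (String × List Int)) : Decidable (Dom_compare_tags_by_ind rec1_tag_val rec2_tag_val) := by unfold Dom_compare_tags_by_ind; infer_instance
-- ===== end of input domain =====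

-- B replaces A's deepcopy + destructive tmp-deletion two-pass bookkeeping with three
-- direct membership filters (set algebra on the key sets); objective: simpler.

-- ===== PORT A =====
-- first loop of A: carries the mutable tmp dict plus the two accumulators;
-- the value inserted is the pair's value, which equals rec1_tag_val[ind_pair]
-- because dict keys are unique.
def pvLoopA1 (l : List (String × List Int)) (tmp common only1 : PySem.Dict String (List Int)) :
    PySem.Dict String (List Int) × PySem.Dict String (List Int) × PySem.Dict String (List Int) :=
  match l with
  | [] => (tmp, common, only1)
  | (k, v) :: rest =>
    if tmp.contains k then
      pvLoopA1 rest (tmp.erase k) (common.insert k v) only1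
    else
      pvLoopA1 rest tmp common (only1.insert k v)

def compare_tags_by_ind (rec1_tag_val : List (String × List Int)) (rec2_tag_val : List (String × List Int)) : (List (String × List Int)) × (List (String × List Int)) × (List (String × List Int)) :=
  let r1 := PySem.Dict.ofList rec1_tag_val
  let r2 := PySem.Dict.ofList rec2_tag_val
  -- tmp = copy.deepcopy(rec2_tag_val)
  let res := pvLoopA1 r1.items r2 PySem.Dict.empty PySem.Dict.empty
  -- second loop: for ind_pair in rec2_tag_val: if ind_pair in tmp: ...
  let only2 := r2.items.foldl
    (fun d p => if res.1.contains p.1 then d.insert p.1 p.2 else d) PySem.Dict.empty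
  (res.2.1.items, res.2.2.items, only2.items)

-- ===== PORT B =====
def compare_tags_by_ind_alt (rec1_tag_val : List (String × List Int)) (rec2_tag_val : List (String × List Int)) : (List (String × List Int)) × (List (String × List Int)) × (List (String × List Int)) :=
  let r1 := PySem.Dict.ofList rec1_tag_val
  let r2 := PySem.Dict.ofList rec2_tag_val
  (r1.items.filter (fun p => r2.contains p.1),
   r1.items.filter (fun p => !(r2.contains p.1)),
   r2.items.filter (fun p => !(r1.contains p.1)))

-- ===== PRECONDITION & SPEC =====
def Spec_compare_tags_by_ind (rec1_tag_val : List (String × List Int)) (rec2_tag_val : List (String × List Int)) (out : (List (String × List Int)) × (List (String × List Int)) × (List (String × List Int))) : Prop := out = compare_tags_by_ind_alt rec1_tag_val rec2_tag_val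
instance (rec1_tag_val : List (String × List Int)) (rec2_tag_val : List (String × List Int)) (out : (List (String × List Int)) × (List (String × List Int)) × (List (String × List Int))) : Decidable (Spec_compare_tags_by_ind rec1_tag_val rec2_tag_val out) := by unfold Spec_compare_tags_by_ind; infer_instance

-- ===== CLAIM (what is proved, stated in full; the proofs are below) =====
def Claim_equal_compare_tags_by_ind : Prop := ∀ (rec1_tag_val : List (String × List Int)) (rec2_tag_val : List (String × List Int)), Dom_compare_tags_by_ind rec1_tag_val rec2_tag_val → Spec_compare_tags_by_ind rec1_tag_val rec2_tag_val (compare_tags_by_ind rec1_tag_val rec2_tag_val)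

-- ===== LEMMAS AND PROOFS =====

theorem pv_contains_erase {κ ν : Type} [BEq κ] [LawfulBEq κ] (d : PySem.Dict κ ν) (k k' : κ) :
    (d.erase k).contains k' = (!(k' == k) && d.contains k') := by
  simp only [PySem.Dict.erase, PySem.Dict.contains, List.any_filter]
  by_cases h : k' = k
  · subst h; simp
  · rw [List.any_congr rfl (q := fun p => p.1 == k')]
    · simp [h]
    · intro a
      by_cases ha : a.1 = k'
      · simp [ha, h]
      · simp [ha]

-- characterisation of A's first loop on a list with distinct keys, for a tmp that
-- agrees with a fixed dict r2 on those keys and accumulators not containing them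
theorem pvLoopA1_spec (r2 : PySem.Dict String (List Int)) :
    ∀ (l : List (String × List Int)) (tmp c o1 : PySem.Dict String (List Int)),
    (l.map (·.1)).Nodup →
    (∀ p ∈ l, tmp.contains p.1 = r2.contains p.1) →
    (∀ p ∈ l, c.contains p.1 = false) →
    (∀ p ∈ l, o1.contains p.1 = false) →
    (pvLoopA1 l tmp c o1).2.1.items = c.items ++ l.filter (fun p => r2.contains p.1) ∧
    (pvLoopA1 l tmp c o1).2.2.items = o1.items ++ l.filter (fun p => !(r2.contains p.1)) ∧
    (∀ k, (pvLoopA1 l tmp c o1).1.contains k =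
      (tmp.contains k && !(l.any (fun p => p.1 == k && r2.contains p.1)))) := by
  intro l
  induction l with
  | nil => intro tmp c o1 _ _ _ _; simp [pvLoopA1]
  | cons hd tl ih =>
    intro tmp c o1 hnd htmp hc ho
    obtain ⟨k, v⟩ := hd
    have hk : k ∉ tl.map (·.1) := by simpa using (List.nodup_cons.mp hnd).1
    have hnd' : (tl.map (·.1)).Nodup := (List.nodup_cons.mp hnd).2
    have hne : ∀ p ∈ tl, p.1 ≠ k := by
      intro p hp h; exact hk (h ▸ List.mem_map_of_mem hp)
    have hkk : tmp.contains k = r2.contains k := htmp (k, v) (List.mem_cons_self ..)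
    by_cases hmem : tmp.contains k = true
    · have hr2 : r2.contains k = true := by rw [← hkk]; exact hmem
      have := ih (tmp.erase k) (c.insert k v) o1 hnd'
        (by intro p hp
            rw [pv_contains_erase, htmp p (List.mem_cons_of_mem _ hp)]
            simp [hne p hp])
        (by intro p hp
            rw [PySem.Dict.contains_insert, hc p (List.mem_cons_of_mem _ hp)]
            simp [hne p hp])
        (by intro p hp; exact ho p (List.mem_cons_of_mem _ hp))
      obtain ⟨h1, h2, h3⟩ := this
      refine ⟨?_, ?_, ?_⟩
      · rw [pvLoopA1, if_pos hmem, h1,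
          PySem.Dict.items_insert_of_not_contains _ _ (hc (k, v) (List.mem_cons_self ..))]
        simp [hr2]
      · rw [pvLoopA1, if_pos hmem, h2]; simp [hr2]
      · intro j
        rw [pvLoopA1, if_pos hmem, h3 j, pv_contains_erase]
        by_cases hjk : j = k
        · subst hjk; simp [hr2]
        · have e1 : (j == k) = false := by simp [hjk]
          have e2 : (k == j) = false := by simp [Ne.symm hjk]
          simp [e1, e2]
    · have hmem' : tmp.contains k = false := by simpa using hmem
      have hr2 : r2.contains k = false := by rw [← hkk]; exact hmem'
      have := ih tmp c (o1.insert k v) hnd'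
        (by intro p hp; exact htmp p (List.mem_cons_of_mem _ hp))
        (by intro p hp; exact hc p (List.mem_cons_of_mem _ hp))
        (by intro p hp
            rw [PySem.Dict.contains_insert, ho p (List.mem_cons_of_mem _ hp)]
            simp [hne p hp])
      obtain ⟨h1, h2, h3⟩ := this
      refine ⟨?_, ?_, ?_⟩
      · rw [pvLoopA1, if_neg hmem, h1]; simp [hr2]
      · rw [pvLoopA1, if_neg hmem, h2,
          PySem.Dict.items_insert_of_not_contains _ _ (ho (k, v) (List.mem_cons_self ..))]
        simp [hr2]
      · intro j
        rw [pvLoopA1, if_neg hmem, h3 j]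
        simp [hr2]

-- ===== VERDICT (by name: the statement is the Claim_ definition above) =====
theorem compare_tags_by_ind_spec : Claim_equal_compare_tags_by_ind := by
  intro rec1 rec2 _
  unfold Spec_compare_tags_by_ind compare_tags_by_ind compare_tags_by_ind_alt
  dsimp only
  set r1 := PySem.Dict.ofList rec1 with hr1
  set r2 := PySem.Dict.ofList rec2 with hr2
  have hnd1 : (r1.items.map (·.1)).Nodup := PySem.Dict.nodup_keys_ofList rec1
  have hnd2 : (r2.items.map (·.1)).Nodup := PySem.Dict.nodup_keys_ofList rec2
  have hmem1 : ∀ p ∈ r1.items, r1.contains p.1 = true := by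
    intro p hp
    exact (PySem.Dict.contains_iff_mem_keys r1 p.1).mpr (PySem.Dict.mem_keys_of_mem_items r1 hp)
  have hmem2 : ∀ p ∈ r2.items, r2.contains p.1 = true := by
    intro p hp
    exact (PySem.Dict.contains_iff_mem_keys r2 p.1).mpr (PySem.Dict.mem_keys_of_mem_items r2 hp)
  obtain ⟨h1, h2, h3⟩ := pvLoopA1_spec r2 r1.items r2 PySem.Dict.empty PySem.Dict.empty
    hnd1 (fun _ _ => rfl) (fun _ _ => rfl) (fun _ _ => rfl)
  refine Prod.ext ?_ (Prod.ext ?_ ?_)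
  · rw [h1]; rfl
  · rw [h2]; rfl
  · -- second loop
    show (List.foldl _ PySem.Dict.empty r2.items).items = _
    have hcond : ∀ p ∈ r2.items,
        (pvLoopA1 r1.items r2 PySem.Dict.empty PySem.Dict.empty).1.contains p.1
          = !(r1.contains p.1) := by
      intro p hp
      rw [h3 p.1, hmem2 p hp]
      by_cases hr : r1.contains p.1 = true
      · have : r1.items.any (fun q => q.1 == p.1 && r2.contains q.1) = true := by
          rw [List.any_eq_true]
          have : p.1 ∈ r1.keys := (PySem.Dict.contains_iff_mem_keys ..).mp hr
          obtain ⟨q, hq, hq1⟩ := List.mem_map.mp this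
          exact ⟨q, hq, by simp [hq1, hmem2 p hp]⟩
        simp [this, hr]
      · have hr' : r1.contains p.1 = false := by simpa using hr
        have : r1.items.any (fun q => q.1 == p.1 && r2.contains q.1) = false := by
          rw [List.any_eq_false]
          intro q hq
          have := hmem1 q hq
          simp only [Bool.and_eq_true, beq_iff_eq, not_and]
          intro hq1 _
          rw [hq1] at this; rw [this] at hr'; exact absurd hr' (by simp)
        simp [this, hr']
    calc (r2.items.foldl (fun d p =>
            if (pvLoopA1 r1.items r2 PySem.Dict.empty PySem.Dict.empty).1.contains p.1
            then d.insert p.1 p.2 else d) PySem.Dict.empty).items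
        = (r2.items.foldl (fun d p =>
            if !(r1.contains p.1) then d.insert p.1 p.2 else d) PySem.Dict.empty).items := by
          congr 1
          apply PySem.List.foldl_congr_mem
          intro d p hp
          rw [hcond p hp]
      _ = ((r2.items.filter (fun p => !(r1.contains p.1))).foldl
            (fun d p => d.insert p.1 p.2) PySem.Dict.empty).items := by
          rw [PySem.List.foldl_if_eq_foldl_filter]
      _ = r2.items.filter (fun p => !(r1.contains p.1)) := by
          rw [PySem.Dict.items_foldl_insert_fresh]
          · show ([] : List (String × List Int)) ++ _ = _
            simp
          · intro a _; rfl
          · exact (((List.filter_sublist (l := r2.items)).map (fun p : String × List Int => p.1)).nodup hnd2)
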